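-- pv_equiv track=rewrite | github.com/FanrenCLI/Keras_CNN | all_code/6All_In_One.py | get_bin_table
-- ===== SOURCE A (Python) =====
-- def get_bin_table(threshold):
--     # 获取灰度转二值的映射table
--     table = []
--     for i in range(256):
--         if i < threshold:
--             table.append(0)
--         else:
--             table.append(1)
--     return table
-- ===== SOURCE B (Python) =====
-- def get_bin_table(threshold):
--     count = min(256, max(0, threshold))
--     return [0] * count + [1] * (256 - count)
-- ===== Notes on version B (the rewrite author's own statement) =====
-- stated objective: simpler
-- what changed: Replaces the per-index append loop with a clamped count and two list-multiplications producing the zero-block and one-block directly.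
import Mathlib
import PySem

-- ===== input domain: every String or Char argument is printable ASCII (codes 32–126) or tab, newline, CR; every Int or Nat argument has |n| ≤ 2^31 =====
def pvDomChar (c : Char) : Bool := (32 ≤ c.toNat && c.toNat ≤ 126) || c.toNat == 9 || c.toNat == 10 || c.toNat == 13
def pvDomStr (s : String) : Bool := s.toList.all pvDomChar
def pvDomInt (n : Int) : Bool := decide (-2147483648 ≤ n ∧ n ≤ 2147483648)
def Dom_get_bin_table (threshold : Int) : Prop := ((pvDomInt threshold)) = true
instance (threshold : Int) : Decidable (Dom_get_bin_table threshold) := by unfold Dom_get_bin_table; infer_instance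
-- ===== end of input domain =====

-- ===== PORT A =====
-- B builds the table as two replicated blocks from a clamped count instead of A's 256-step append loop (objective: simpler).
def get_bin_table (threshold : Int) : List Int :=
  (PySem.List.pyRange 0 256 1).foldl
    (fun table i => if i < threshold then table ++ [0] else table ++ [1]) []

-- ===== PORT B =====
def get_bin_table_alt (threshold : Int) : List Int :=
  let count := min 256 (max 0 threshold)
  List.replicate count.toNat 0 ++ List.replicate (256 - count).toNat 1

-- ===== PRECONDITION & SPEC =====
def Spec_get_bin_table (threshold : Int) (out : List Int) : Prop := out = get_bin_table_alt threshold
instance (threshold : Int) (out : List Int) : Decidable (Spec_get_bin_table threshold out) := by unfold Spec_get_bin_table; infer_instance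

-- ===== CLAIM (what is proved, stated in full; the proofs are below) =====
def Claim_equal_get_bin_table : Prop := ∀ (threshold : Int), Dom_get_bin_table threshold → Spec_get_bin_table threshold (get_bin_table threshold)

-- ===== LEMMAS AND PROOFS =====

theorem get_bin_table_loop (threshold : Int) (n : Nat) :
    (PySem.List.pyRange 0 n 1).foldl
      (fun (table : List Int) i => if i < threshold then table ++ [0] else table ++ [1]) []
    = List.replicate (min (n : Int) (max 0 threshold)).toNat (0 : Int)
        ++ List.replicate ((n : Int) - min (n : Int) (max 0 threshold)).toNat (1 : Int) := by
  induction n with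
  | zero => simp [PySem.List.pyRange]
  | succ n ih =>
    have h : PySem.List.pyRange 0 ((n : Int) + 1) 1 = PySem.List.pyRange 0 (n : Int) 1 ++ [(n : Int)] := by
      exact PySem.List.pyRange_one_succ_right (by exact_mod_cast Nat.zero_le n)
    push_cast
    rw [h, List.foldl_append, ih]
    simp only [List.foldl]
    by_cases hn : (n : Int) < threshold
    · rw [if_pos hn]
      have h1 : min ((n : Int) + 1) (max 0 threshold) = (n : Int) + 1 := by omega
      have h2 : min (n : Int) (max 0 threshold) = (n : Int) := by omega
      rw [h1, h2]
      have : ((n : Int) + 1).toNat = (n : Int).toNat + 1 := by omega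
      simp [this, List.replicate_succ']
    · rw [if_neg hn]
      have h2 : min ((n : Int) + 1) (max 0 threshold) = min (n : Int) (max 0 threshold) := by omega
      rw [h2]
      have : ((n : Int) + 1 - min (n : Int) (max 0 threshold)).toNat
           = ((n : Int) - min (n : Int) (max 0 threshold)).toNat + 1 := by omega
      rw [this, List.replicate_succ', List.append_assoc]

-- ===== VERDICT (by name: the statement is the Claim_ definition above) =====
set_option maxRecDepth 4000 in
theorem get_bin_table_spec : Claim_equal_get_bin_table := by
  intro threshold _
  unfold Spec_get_bin_table get_bin_table get_bin_table_alt
  have h := get_bin_table_loop threshold 256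
  norm_num at h
  exact h
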